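-- pv_equiv track=rewrite | github.com/JH-TT/Coding_Practice | Programmers/String_P/155652.py | solution
-- ===== SOURCE A (Python) =====
-- def solution(s, skip, index):
--     answer = ''
--     alpha = 'abcdefghijklmnopqrstuvwxyz'
--     n = len(alpha)
--
--     for word in s:
--         cnt = 0
--         idx = alpha.index(word)
--         while cnt < index:
--             idx += 1
--             if alpha[idx % n] not in skip:
--                 cnt += 1
--
--         answer += alpha[idx % n]
--
--     return answer
-- ===== SOURCE B (Python) =====
-- def solution(s, skip, index):
--     alpha = 'abcdefghijklmnopqrstuvwxyz'
--     if index <= 0: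
--         return s
--     valid = [c for c in alpha if c not in skip]
--     m = len(valid)
--     rank = {c: r for r, c in enumerate(valid)}
--     shifted = {}
--     for i, ch in enumerate(alpha):
--         for d in range(1, 27):
--             c2 = alpha[(i + d) % 26]
--             if c2 in rank:
--                 shifted[ch] = valid[(rank[c2] + index - 1) % m]
--                 break
--     return ''.join(shifted[ch] for ch in s)
-- ===== Notes on version B (the rewrite author's own statement) =====
-- stated objective: faster
-- what changed: A walks `index` single steps through the alphabet per character of s (counting non-skipped letters one by one); B precomputes the list of valid letters and a per-letter table that jumps straight to valid[(rank(next valid) + index - 1) % m], so the work no longer depends on `index`.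
import Mathlib
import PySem

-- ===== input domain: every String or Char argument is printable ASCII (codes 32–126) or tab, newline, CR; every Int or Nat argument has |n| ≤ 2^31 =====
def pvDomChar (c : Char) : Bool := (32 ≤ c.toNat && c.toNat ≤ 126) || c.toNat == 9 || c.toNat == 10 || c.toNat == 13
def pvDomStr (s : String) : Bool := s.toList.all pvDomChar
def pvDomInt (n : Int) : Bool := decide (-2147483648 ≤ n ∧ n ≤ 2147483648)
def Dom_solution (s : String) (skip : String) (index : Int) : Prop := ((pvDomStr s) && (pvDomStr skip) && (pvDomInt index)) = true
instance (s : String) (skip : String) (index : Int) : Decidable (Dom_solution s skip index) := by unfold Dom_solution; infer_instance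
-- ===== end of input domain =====

-- B replaces A's per-character counting walk (index iterations of a 26-step scan per character) by a
-- precomputed valid-letter list indexed modularly, making the work independent of `index`.

-- ===== PORT A =====
def pvAlpha : List Char := "abcdefghijklmnopqrstuvwxyz".toList

-- the `while cnt < index` loop; fuel-guarded (fuel only makes it total: under Pre_ it never runs out)
def solutionLoop (skipL : List Char) (index : Int) : Nat → Int → Int → Int
  | 0, _, idx => idx
  | fuel+1, cnt, idx =>
    if cnt < index then
      let idx' := idx + 1
      -- `alpha[idx % n] not in skip`: single-char `in` on a string = char membership (exact)
      if PySem.Chars.isIn [PySem.List.pyGetD pvAlpha (PySem.Int.mod idx' 26) 'a'] skipL then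
        solutionLoop skipL index fuel cnt idx'
      else
        solutionLoop skipL index fuel (cnt + 1) idx'
    else idx

-- one pass of A's `for word in s` body
def solutionChar (skipL : List Char) (index : Int) (word : Char) : Char :=
  -- `alpha.index(word)`: raises ValueError when absent (excluded by Pre_); getD 0 is unreachable there
  let idx0 : Int := (((PySem.List.index? pvAlpha word).getD 0 : Nat) : Int)
  let idxf := solutionLoop skipL index (26 * (index.toNat + 1)) 0 idx0
  PySem.List.pyGetD pvAlpha (PySem.Int.mod idxf 26) 'a'

def solution (s : String) (skip : String) (index : Int) : String :=
  String.ofList (s.toList.foldl (fun answer word =>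
    answer ++ [solutionChar skip.toList index word]) [])

-- ===== PORT B =====
-- Source B's local `valid = [c for c in alpha if c not in skip]`
def altValid (skipL : List Char) : List Char :=
  pvAlpha.filter (fun c => !(PySem.Chars.isIn [c] skipL))

-- Source B's local `rank = {c: r for r, c in enumerate(valid)}`
def altRank (skipL : List Char) : PySem.Dict Char Int :=
  (PySem.List.enumerate (altValid skipL) 0).foldl (fun d p => d.insert p.2 p.1) PySem.Dict.empty

-- Source B's local `shifted`: per alphabet letter, the inner `for d in range(1, 27) … break` is find?
def altShifted (skipL : List Char) (index : Int) : PySem.Dict Char Char :=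
  (PySem.List.enumerate pvAlpha 0).foldl (fun d p =>
    match (List.range' 1 26).find? (fun dd : Nat =>
        (altRank skipL).contains (pvAlpha.getD (PySem.Int.mod (p.1 + (dd : Int)) 26).toNat 'a')) with
    | some dd =>
        d.insert p.2 ((altValid skipL).getD
          (PySem.Int.mod ((altRank skipL).getD (pvAlpha.getD (PySem.Int.mod (p.1 + (dd : Int)) 26).toNat 'a') 0
              + index - 1) ((altValid skipL).length : Int)).toNat 'a')
    | none => d) PySem.Dict.empty

def solution_alt (s : String) (skip : String) (index : Int) : String :=
  if index ≤ 0 then s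
  else String.ofList (s.toList.map (fun ch => (altShifted skip.toList index).getD ch ch))

-- ===== PRECONDITION & SPEC =====
-- Pre_ excludes exactly the inputs where A does not return: a character of s outside 'a'..'z'
-- (ValueError from alpha.index), and index > 0 with a nonempty s while every letter is in skip
-- (A's while loop never terminates).
def Pre_solution (s : String) (skip : String) (index : Int) : Prop :=
  s.toList.all (fun c => pvAlpha.contains c) = true ∧
  (0 < index → s.toList = [] ∨ pvAlpha.any (fun c => !(skip.toList.contains c)) = true)
instance (s : String) (skip : String) (index : Int) : Decidable (Pre_solution s skip index) := by
  unfold Pre_solution; infer_instance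

def pvWitness_solution : String × String × Int := ("ab", "b", 3)

def Spec_solution (s : String) (skip : String) (index : Int) (out : String) : Prop := out = solution_alt s skip index
instance (s : String) (skip : String) (index : Int) (out : String) : Decidable (Spec_solution s skip index out) := by unfold Spec_solution; infer_instance

-- ===== CLAIM (what is proved, stated in full; the proofs are below) =====
def Claim_equal_solution : Prop := ∀ (s : String) (skip : String) (index : Int), Dom_solution s skip index → Pre_solution s skip index → Spec_solution s skip index (solution s skip index)

-- ===== LEMMAS AND PROOFS =====

-- "position i (mod 26) of the alphabet is a valid (non-skipped) letter" — exactly A's loop test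
def pvQ (skipL : List Char) (i : Int) : Bool :=
  !(PySem.Chars.isIn [PySem.List.pyGetD pvAlpha (PySem.Int.mod i 26) 'a'] skipL)

-- distance from i to the next valid position (26 is a dead default: under pvHv the find? succeeds)
def pvDst (skipL : List Char) (i : Int) : Nat :=
  ((List.range' 1 26).find? (fun d : Nat => pvQ skipL (i + (d : Int)))).getD 26

def pvNxt (skipL : List Char) (i : Int) : Int := i + pvDst skipL i
def pvNxtE (skipL : List Char) (i : Int) : Int := (i + pvDst skipL i) % 26
def pvVP (skipL : List Char) : List Nat := (List.range 26).filter (fun j => pvQ skipL (j : Int))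
def pvHv (skipL : List Char) : Prop := ∃ j : Nat, j < 26 ∧ pvQ skipL (j : Int) = true

theorem pv_isIn_singleton (c : Char) (l : List Char) : PySem.Chars.isIn [c] l = true ↔ c ∈ l := by
  rw [PySem.Chars.isIn_iff_infix]; exact List.singleton_infix_iff c l

theorem pvAlpha_nodup : pvAlpha.Nodup := by decide

theorem pvAlpha_length : pvAlpha.length = 26 := by decide

theorem pvQ_emod (skipL : List Char) (i : Int) : pvQ skipL i = pvQ skipL (i % 26) := by
  unfold pvQ
  rw [PySem.Int.mod_eq_emod_of_pos (by norm_num), PySem.Int.mod_eq_emod_of_pos (by norm_num),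
    Int.emod_emod_of_dvd _ dvd_rfl]

theorem pvQ_lt26 (skipL : List Char) (j : Nat) (hj : j < 26) :
    pvQ skipL (j : Int) = !(PySem.Chars.isIn [pvAlpha.getD j 'a'] skipL) := by
  unfold pvQ
  rw [PySem.Int.mod_eq_emod_of_pos (by norm_num),
    Int.emod_eq_of_lt (by positivity) (by exact_mod_cast hj), PySem.List.pyGetD_natCast]

theorem pv_find_range'_eq (p : Nat → Bool) (d : Nat) (h1 : 1 ≤ d) (h2 : d ≤ 26)
    (hp : p d = true) (hmin : ∀ e, 1 ≤ e → e < d → p e = false) :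
    (List.range' 1 26).find? p = some d := by
  have e1 : 1 + 1 * (d - 1) = d := by omega
  have e2 : (d - 1) + (27 - d) = 26 := by omega
  have hsplit := List.range'_append (s := 1) (m := d - 1) (n := 27 - d) (step := 1)
  rw [e1, e2] at hsplit
  rw [← hsplit, List.find?_append]
  have hnone : List.find? p (List.range' 1 (d - 1)) = none := by
    rw [List.find?_eq_none]
    intro x hx
    rw [List.mem_range'_1] at hx
    simp [hmin x hx.1 (by omega)]
  rw [hnone]
  have e3 : List.range' d (27 - d) = d :: List.range' (d + 1) (26 - d) := by
    have e4 : 27 - d = 26 - d + 1 := by omega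
    rw [e4, List.range'_succ]
  rw [e3]
  simp [hp]

theorem pv_exists_dst (skipL : List Char) (hv : pvHv skipL) (i : Int) :
    ∃ d : Nat, 1 ≤ d ∧ d ≤ 26 ∧ pvQ skipL (i + (d : Int)) = true := by
  obtain ⟨j, hj, hq⟩ := hv
  set r : Int := ((j : Int) - i - 1) % 26 with hr
  have hb : 0 ≤ r ∧ r < 26 := ⟨Int.emod_nonneg _ (by norm_num), Int.emod_lt_of_pos _ (by norm_num)⟩
  refine ⟨(r + 1).toNat, by omega, by omega, ?_⟩
  have hc : ((r + 1).toNat : Int) = r + 1 := by omega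
  rw [pvQ_emod skipL (i + _), hc]
  rw [pvQ_emod skipL (j : Int)] at hq
  have : (i + (r + 1)) % 26 = (j : Int) % 26 := by omega
  rw [this]; exact hq

theorem pvDst_spec (skipL : List Char) (hv : pvHv skipL) (i : Int) :
    1 ≤ pvDst skipL i ∧ pvDst skipL i ≤ 26 ∧ pvQ skipL (i + (pvDst skipL i : Int)) = true ∧
      ∀ e : Nat, 1 ≤ e → e < pvDst skipL i → pvQ skipL (i + (e : Int)) = false := by
  obtain ⟨d0, hd1, hd2, hdq⟩ := pv_exists_dst skipL hv i
  have hex : ∃ d : Nat, 1 ≤ d ∧ pvQ skipL (i + (d : Int)) = true := ⟨d0, hd1, hdq⟩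
  have hspec := Nat.find_spec hex
  have hle : Nat.find hex ≤ 26 := le_trans (Nat.find_min' hex ⟨hd1, hdq⟩) hd2
  have hmin : ∀ e : Nat, 1 ≤ e → e < Nat.find hex → pvQ skipL (i + (e : Int)) = false := by
    intro e he1 he2
    have := Nat.find_min hex he2
    simp only [not_and] at this
    exact Bool.not_eq_true _ ▸ (by simpa using this he1)
  have heq : pvDst skipL i = Nat.find hex := by
    unfold pvDst
    rw [pv_find_range'_eq _ _ hspec.1 hle hspec.2 hmin]
    rfl
  rw [heq]
  exact ⟨hspec.1, hle, hspec.2, hmin⟩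

theorem pvDst_emod (skipL : List Char) (i : Int) : pvDst skipL i = pvDst skipL (i % 26) := by
  unfold pvDst
  have : (fun d : Nat => pvQ skipL (i + (d : Int))) = (fun d : Nat => pvQ skipL (i % 26 + (d : Int))) := by
    funext d
    rw [pvQ_emod skipL (i + _), pvQ_emod skipL (i % 26 + _)]
    have h : (i + (d : Int)) % 26 = (i % 26 + (d : Int)) % 26 := by omega
    rw [h]
  rw [this]

theorem pv_loop_exit (skipL : List Char) (index : Int) (f : Nat) (cnt idx : Int)
    (h : ¬ cnt < index) : solutionLoop skipL index f cnt idx = idx := by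
  cases f with
  | zero => rfl
  | succ f => simp only [solutionLoop, if_neg h]

theorem pv_loop_step (skipL : List Char) (index : Int) (d : Nat) (f : Nat) (cnt idx : Int)
    (h1 : 1 ≤ d) (h2 : d ≤ f) (hc : cnt < index)
    (hmin : ∀ e : Nat, 1 ≤ e → e < d → pvQ skipL (idx + (e : Int)) = false)
    (hd : pvQ skipL (idx + (d : Int)) = true) :
    solutionLoop skipL index f cnt idx = solutionLoop skipL index (f - d) (cnt + 1) (idx + (d : Int)) := by
  induction d generalizing f cnt idx with
  | zero => omega
  | succ d ih =>
    obtain ⟨f', rfl⟩ : ∃ f', f = f' + 1 := ⟨f - 1, by omega⟩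
    by_cases hd0 : d = 0
    · subst hd0
      have hC : PySem.Chars.isIn [PySem.List.pyGetD pvAlpha (PySem.Int.mod (idx + 1) 26) 'a'] skipL = false := by
        have := hd; unfold pvQ at this; push_cast at this; simpa using this
      simp only [solutionLoop, if_pos hc]
      simp only [hC, Bool.false_eq_true, ite_false]
      norm_num
    · have hq1 : pvQ skipL (idx + (1 : Int)) = false := by
        have := hmin 1 le_rfl (by omega); push_cast at this ⊢; exact this
      have hC : PySem.Chars.isIn [PySem.List.pyGetD pvAlpha (PySem.Int.mod (idx + 1) 26) 'a'] skipL = true := by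
        unfold pvQ at hq1; simpa using hq1
      simp only [solutionLoop, if_pos hc]
      simp only [hC, ite_true]
      have := ih f' cnt (idx + 1) (by omega) (by omega) hc
        (fun e he1 he2 => by
          have := hmin (e + 1) (by omega) (by omega)
          push_cast at this ⊢; convert this using 2; ring)
        (by push_cast at hd ⊢; convert hd using 2; ring)
      rw [this]
      congr 1
      · omega
      · push_cast; ring

theorem pv_loop_iter (skipL : List Char) (index : Int) (hv : pvHv skipL) (k : Nat) :
    ∀ (f : Nat) (cnt idx : Int), cnt + (k : Int) = index → 26 * k ≤ f →
    solutionLoop skipL index f cnt idx = (pvNxt skipL)^[k] idx := by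
  induction k with
  | zero =>
    intro f cnt idx hk hf
    simp only [Function.iterate_zero, id]
    exact pv_loop_exit skipL index f cnt idx (by omega)
  | succ k ih =>
    intro f cnt idx hk hf
    have hc : cnt < index := by push_cast at hk; omega
    obtain ⟨hd1, hd2, hdq, hdmin⟩ := pvDst_spec skipL hv idx
    rw [pv_loop_step skipL index (pvDst skipL idx) f cnt idx hd1 (by omega) hc hdmin hdq]
    rw [ih (f - pvDst skipL idx) (cnt + 1) (idx + (pvDst skipL idx : Int))
      (by push_cast at hk ⊢; omega) (by omega)]
    rw [Function.iterate_succ_apply]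
    rfl

theorem pv_iter_emod (skipL : List Char) (k : Nat) (i : Int) :
    ((pvNxt skipL)^[k] i) % 26 = (pvNxtE skipL)^[k] (i % 26) := by
  induction k generalizing i with
  | zero => rfl
  | succ k ih =>
    rw [Function.iterate_succ_apply, Function.iterate_succ_apply, ih]
    congr 1
    show (i + pvDst skipL i) % 26 = (i % 26 + pvDst skipL (i % 26)) % 26
    rw [← pvDst_emod]
    omega

theorem pv_mem_vp (skipL : List Char) (j : Nat) :
    j ∈ pvVP skipL ↔ j < 26 ∧ pvQ skipL (j : Int) = true := by
  unfold pvVP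
  simp [List.mem_filter, List.mem_range]

theorem pv_vp_lt26 (skipL : List Char) (r : Nat) (hr : r < (pvVP skipL).length) :
    (pvVP skipL)[r] < 26 :=
  ((pv_mem_vp skipL _).1 (List.getElem_mem hr)).1

theorem pv_vp_q (skipL : List Char) (r : Nat) (hr : r < (pvVP skipL).length) :
    pvQ skipL ((pvVP skipL)[r] : Int) = true :=
  ((pv_mem_vp skipL _).1 (List.getElem_mem hr)).2

theorem pv_vp_mono (skipL : List Char) (r t : Nat) (hr : r < (pvVP skipL).length)
    (ht : t < (pvVP skipL).length) (h : r < t) : (pvVP skipL)[r] < (pvVP skipL)[t] := by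
  have hp : (pvVP skipL).Pairwise (· < ·) := List.Pairwise.filter _ List.pairwise_lt_range
  exact List.pairwise_iff_getElem.1 hp r t hr ht h

theorem pv_vp_rev (skipL : List Char) (r t : Nat) (hr : r < (pvVP skipL).length)
    (ht : t < (pvVP skipL).length) (h : (pvVP skipL)[r] < (pvVP skipL)[t]) : r < t := by
  by_contra hc
  rcases Nat.lt_or_ge t r with h' | h'
  · exact absurd (pv_vp_mono skipL t r ht hr h') (by omega)
  · have : t = r := by omega
    subst this; omega

theorem pv_K2 (skipL : List Char) (j : Nat) (hj : j < (pvVP skipL).length) :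
    pvNxtE skipL ((pvVP skipL)[j] : Int) =
      (((pvVP skipL)[(j + 1) % (pvVP skipL).length]'(Nat.mod_lt _ (by omega)) : Nat) : Int) := by
  have hm : 0 < (pvVP skipL).length := by omega
  have hmlt : (j + 1) % (pvVP skipL).length < (pvVP skipL).length := Nat.mod_lt _ hm
  obtain ⟨a, ha⟩ : ∃ a, (pvVP skipL)[j] = a := ⟨_, rfl⟩
  obtain ⟨b, hb⟩ : ∃ b, (pvVP skipL)[(j + 1) % (pvVP skipL).length]'hmlt = b := ⟨_, rfl⟩
  rw [ha, hb]
  have ha26 : a < 26 := ha ▸ pv_vp_lt26 skipL j hj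
  have hb26 : b < 26 := hb ▸ pv_vp_lt26 skipL _ hmlt
  have haq : pvQ skipL (a : Int) = true := ha ▸ pv_vp_q skipL j hj
  have hbq : pvQ skipL (b : Int) = true := hb ▸ pv_vp_q skipL _ hmlt
  have key : ∀ d0 : Nat, 1 ≤ d0 → d0 ≤ 26 → ((a : Int) + d0) % 26 = (b : Int) →
      (∀ e : Nat, 1 ≤ e → e < d0 → pvQ skipL ((a : Int) + e) = false) →
      pvNxtE skipL (a : Int) = (b : Int) := by
    intro d0 h1 h2 hmod hmin
    have hq : pvQ skipL ((a : Int) + d0) = true := by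
      rw [pvQ_emod, hmod]; exact hbq
    have hdst : pvDst skipL (a : Int) = d0 := by
      unfold pvDst
      rw [pv_find_range'_eq _ d0 h1 h2 hq hmin]; rfl
    unfold pvNxtE
    rw [hdst, hmod]
  have toVP : ∀ x : Nat, x < 26 → pvQ skipL (x : Int) = true →
      ∃ t, ∃ ht : t < (pvVP skipL).length, (pvVP skipL)[t] = x := by
    intro x hx hxq
    exact List.mem_iff_getElem.1 ((pv_mem_vp skipL x).2 ⟨hx, hxq⟩)
  have resid : ∀ e : Nat, pvQ skipL ((a : Int) + e) = true →
      ∃ t, ∃ ht : t < (pvVP skipL).length, (pvVP skipL)[t] = (a + e) % 26 := by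
    intro e hq'
    apply toVP _ (Nat.mod_lt _ (by norm_num))
    have hcast : (((a + e) % 26 : Nat) : Int) = ((a : Int) + e) % 26 := by push_cast; omega
    rw [hcast, ← pvQ_emod]; exact hq'
  by_cases hcase : j + 1 < (pvVP skipL).length
  · have hj1 : (j + 1) % (pvVP skipL).length = j + 1 := Nat.mod_eq_of_lt hcase
    simp only [hj1] at hb
    have hab : a < b := by
      have h := pv_vp_mono skipL j (j + 1) hj hcase (by omega)
      rw [ha, hb] at h; exact h
    refine key (b - a) (by omega) (by omega) (by omega) ?_
    intro e he1 he2
    by_contra hcq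
    have hq' : pvQ skipL ((a : Int) + e) = true := by
      cases hq2 : pvQ skipL ((a : Int) + e) <;> simp_all
    obtain ⟨t, ht, hte⟩ := resid e hq'
    have hmod : (a + e) % 26 = a + e := Nat.mod_eq_of_lt (by omega)
    rw [hmod] at hte
    have h1 : j < t := pv_vp_rev skipL j t hj ht (by rw [ha, hte]; omega)
    have h2 : t < j + 1 := pv_vp_rev skipL t (j + 1) ht hcase (by rw [hb, hte]; omega)
    omega
  · have hj1 : j = (pvVP skipL).length - 1 := by omega
    have hj2 : (j + 1) % (pvVP skipL).length = 0 := by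
      have : j + 1 = (pvVP skipL).length := by omega
      simp [this]
    simp only [hj2] at hb
    have hba : b ≤ a := by
      rcases Nat.lt_or_ge 0 j with h0 | h0
      · have h := pv_vp_mono skipL 0 j hm hj h0
        rw [ha, hb] at h; omega
      · have : j = 0 := by omega
        subst this; rw [← ha, ← hb]
    refine key (26 - a + b) (by omega) (by omega) (by push_cast; omega) ?_
    intro e he1 he2
    by_contra hcq
    have hq' : pvQ skipL ((a : Int) + e) = true := by
      cases hq2 : pvQ skipL ((a : Int) + e) <;> simp_all
    obtain ⟨t, ht, hte⟩ := resid e hq'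
    rcases Nat.lt_or_ge (a + e) 26 with hlt | hge
    · have hmod : (a + e) % 26 = a + e := Nat.mod_eq_of_lt hlt
      rw [hmod] at hte
      have h1 : j < t := pv_vp_rev skipL j t hj ht (by rw [ha, hte]; omega)
      omega
    · have hmod : (a + e) % 26 = a + e - 26 := by omega
      rw [hmod] at hte
      have h1 : t < 0 := pv_vp_rev skipL t 0 ht hm (by rw [hb, hte]; omega)
      omega

theorem pv_iterate (skipL : List Char) (k j : Nat) (hj : j < (pvVP skipL).length) :
    (pvNxtE skipL)^[k] ((pvVP skipL)[j] : Int) =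
      (((pvVP skipL)[(j + k) % (pvVP skipL).length]'(Nat.mod_lt _ (by omega)) : Nat) : Int) := by
  induction k generalizing j with
  | zero => simp [Nat.mod_eq_of_lt hj]
  | succ k ih =>
    rw [Function.iterate_succ_apply, pv_K2 skipL j hj]
    rw [ih ((j + 1) % (pvVP skipL).length) (Nat.mod_lt _ (by omega))]
    have heq : ((j + 1) % (pvVP skipL).length + k) % (pvVP skipL).length
        = (j + (k + 1)) % (pvVP skipL).length := by
      rw [Nat.mod_add_mod]; congr 1; omega
    simp only [heq]

theorem pv_nxtE_mem (skipL : List Char) (hv : pvHv skipL) (i : Int) :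
    ∃ (r : Nat) (hr : r < (pvVP skipL).length), ((pvVP skipL)[r] : Int) = pvNxtE skipL i := by
  have hq : pvQ skipL (i + (pvDst skipL i : Int)) = true := (pvDst_spec skipL hv i).2.2.1
  have hb : 0 ≤ (i + (pvDst skipL i : Int)) % 26 ∧ (i + (pvDst skipL i : Int)) % 26 < 26 :=
    ⟨Int.emod_nonneg _ (by norm_num), Int.emod_lt_of_pos _ (by norm_num)⟩
  set x : Nat := ((i + (pvDst skipL i : Int)) % 26).toNat with hx
  have hcast : (x : Int) = (i + (pvDst skipL i : Int)) % 26 := by omega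
  have hqx : pvQ skipL (x : Int) = true := by
    rw [hcast, ← pvQ_emod]; exact hq
  obtain ⟨t, ht, hte⟩ := List.mem_iff_getElem.1 ((pv_mem_vp skipL x).2 ⟨by omega, hqx⟩)
  exact ⟨t, ht, by rw [hte]; unfold pvNxtE; omega⟩

theorem pv_filter_eq_map (xs : List Char) (p : Char → Bool) (d : Char) :
    xs.filter p = ((List.range xs.length).filter (fun j => p (xs.getD j d))).map (fun j => xs.getD j d) := by
  induction xs with
  | nil => rfl
  | cons x t ih =>
    simp only [List.length_cons, List.range_succ_eq_map, List.filter_cons, List.getD_cons_zero,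
      List.filter_map]
    by_cases hp : p x
    · simp only [hp, if_pos]
      simp only [Function.comp_def, Nat.succ_eq_add_one, List.getD_cons_succ]
      rw [ih]
      simp [List.map_map, Function.comp_def]
    · simp only [hp, Bool.false_eq_true, ite_false]
      simp only [Function.comp_def, Nat.succ_eq_add_one, List.getD_cons_succ]
      rw [ih]
      simp [List.map_map, Function.comp_def]

theorem pv_valid_eq (skipL : List Char) :
    altValid skipL = (pvVP skipL).map (fun j => pvAlpha.getD j 'a') := by
  unfold altValid pvVP
  rw [pv_filter_eq_map pvAlpha _ 'a', pvAlpha_length]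
  congr 1


theorem altValid_nodup (skipL : List Char) : (altValid skipL).Nodup :=
  List.Nodup.filter _ pvAlpha_nodup

theorem pv_rank_items (skipL : List Char) :
    (altRank skipL).items = (PySem.List.enumerate (altValid skipL) 0).map (fun p => (p.2, p.1)) := by
  unfold altRank
  rw [PySem.Dict.items_foldl_insert_fresh (PySem.List.enumerate (altValid skipL) 0)
    (fun p => p.2) (fun p => p.1) PySem.Dict.empty
    (fun a _ => PySem.Dict.contains_empty _)
    (by rw [PySem.List.map_snd_enumerate]; exact altValid_nodup skipL)]
  rfl

theorem pv_rank_keys (skipL : List Char) : (altRank skipL).keys = altValid skipL := by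
  show (altRank skipL).items.map (·.1) = altValid skipL
  rw [pv_rank_items, List.map_map]
  exact PySem.List.map_snd_enumerate _ 0

theorem pv_rank_get? (skipL : List Char) (r : Nat) (hr : r < (altValid skipL).length) :
    (altRank skipL).get? ((altValid skipL)[r]) = some (r : Int) := by
  apply PySem.Dict.get?_of_mem_items
  · rw [pv_rank_items]
    apply List.mem_map.2
    refine ⟨(PySem.List.enumerate (altValid skipL) 0)[r]'(by rw [PySem.List.length_enumerate]; exact hr), List.getElem_mem _, ?_⟩
    rw [PySem.List.getElem_enumerate]
    simp
  · rw [pv_rank_keys]; exact altValid_nodup skipL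

theorem pv_rank_contains (skipL : List Char) (c : Char) :
    (altRank skipL).contains c = true ↔ c ∈ altValid skipL := by
  rw [PySem.Dict.contains_iff_mem_keys, pv_rank_keys]

theorem pv_pred_eq (skipL : List Char) (i : Int) (dd : Nat) :
    (altRank skipL).contains (pvAlpha.getD (PySem.Int.mod (i + (dd : Int)) 26).toNat 'a')
      = pvQ skipL (i + (dd : Int)) := by
  have hmod : PySem.Int.mod (i + (dd : Int)) 26 = (i + (dd : Int)) % 26 :=
    PySem.Int.mod_eq_emod_of_pos (by norm_num)
  have hb : 0 ≤ (i + (dd : Int)) % 26 ∧ (i + (dd : Int)) % 26 < 26 :=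
    ⟨Int.emod_nonneg _ (by norm_num), Int.emod_lt_of_pos _ (by norm_num)⟩
  have hlen : ((i + (dd : Int)) % 26).toNat < pvAlpha.length := by rw [pvAlpha_length]; omega
  have hgetD : pvAlpha.getD ((i + (dd : Int)) % 26).toNat 'a' = pvAlpha[((i + (dd : Int)) % 26).toNat] :=
    List.getD_eq_getElem pvAlpha 'a' hlen
  have hpy : PySem.List.pyGetD pvAlpha (PySem.Int.mod (i + (dd : Int)) 26) 'a'
      = pvAlpha[((i + (dd : Int)) % 26).toNat] := by
    rw [hmod]
    exact PySem.List.pyGetD_eq_getElem pvAlpha 'a' hb.1 (by rw [pvAlpha_length]; exact_mod_cast hb.2)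
  rw [Bool.eq_iff_iff, hmod, hgetD, pv_rank_contains]
  unfold pvQ
  rw [hmod] at hpy ⊢
  rw [hpy]
  unfold altValid
  rw [List.mem_filter]
  exact ⟨fun h => h.2, fun h => ⟨List.getElem_mem _, h⟩⟩

theorem pv_find_eq (skipL : List Char) (hv : pvHv skipL) (i : Int) :
    (List.range' 1 26).find? (fun dd : Nat =>
        (altRank skipL).contains (pvAlpha.getD (PySem.Int.mod (i + (dd : Int)) 26).toNat 'a'))
      = some (pvDst skipL i) := by
  have hfun : (fun dd : Nat =>
      (altRank skipL).contains (pvAlpha.getD (PySem.Int.mod (i + (dd : Int)) 26).toNat 'a'))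
      = (fun dd : Nat => pvQ skipL (i + (dd : Int))) := funext (pv_pred_eq skipL i)
  rw [hfun]
  obtain ⟨h1, h2, h3, h4⟩ := pvDst_spec skipL hv i
  exact pv_find_range'_eq _ _ h1 h2 h3 h4

-- the value Source B's table stores for the letter at position i
def pvBVal (skipL : List Char) (index : Int) (i : Int) : Char :=
  (altValid skipL).getD
    (PySem.Int.mod ((altRank skipL).getD (pvAlpha.getD (PySem.Int.mod (i + (pvDst skipL i : Int)) 26).toNat 'a') 0
        + index - 1) ((altValid skipL).length : Int)).toNat 'a'

theorem pv_shifted_get? (skipL : List Char) (index : Int) (hv : pvHv skipL) (i0 : Nat)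
    (hi : i0 < pvAlpha.length) :
    (altShifted skipL index).get? (pvAlpha[i0]) = some (pvBVal skipL index (i0 : Int)) := by
  unfold altShifted
  rw [PySem.List.foldl_congr_mem _ _
    (fun d p => d.insert p.2 (pvBVal skipL index p.1)) _
    (by
      intro acc p _
      rw [pv_find_eq skipL hv p.1]
      rfl)]
  have hitems := PySem.Dict.items_foldl_insert_fresh (PySem.List.enumerate pvAlpha 0)
    (fun p : Int × Char => p.2) (fun p : Int × Char => pvBVal skipL index p.1) PySem.Dict.empty
    (fun a _ => PySem.Dict.contains_empty _)
    (by rw [PySem.List.map_snd_enumerate]; exact pvAlpha_nodup)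
  have hemp : (PySem.Dict.empty : PySem.Dict Char Char).items = [] := rfl
  apply PySem.Dict.get?_of_mem_items
  · rw [hitems, hemp, List.nil_append]
    apply List.mem_map.2
    refine ⟨(PySem.List.enumerate pvAlpha 0)[i0]'(by rw [PySem.List.length_enumerate]; exact hi), List.getElem_mem _, ?_⟩
    rw [PySem.List.getElem_enumerate]
    simp
  · have hkeys : ∀ d : PySem.Dict Char Char, d.keys = d.items.map (·.1) := fun _ => rfl
    rw [hkeys, hitems, hemp, List.nil_append, List.map_map]
    have hcomp : ((fun x : Char × Char => x.1) ∘ (fun a : Int × Char => (a.2, pvBVal skipL index a.1)))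
        = fun a : Int × Char => a.2 := rfl
    rw [hcomp, PySem.List.map_snd_enumerate]
    exact pvAlpha_nodup

-- per-character agreement: A's walked-out letter is exactly Source B's table entry
theorem pv_char_eq (skipL : List Char) (index : Int) (hv : pvHv skipL) (hpos : 1 ≤ index)
    (i0 : Nat) (hi : i0 < 26) :
    PySem.List.pyGetD pvAlpha (PySem.Int.mod ((pvNxt skipL)^[index.toNat] (i0 : Int)) 26) 'a'
      = pvBVal skipL index (i0 : Int) := by
  have hK : 1 ≤ index.toNat := by omega
  have hKi : (index.toNat : Int) = index := Int.toNat_of_nonneg (by omega)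
  obtain ⟨r, hr, hrEq⟩ := pv_nxtE_mem skipL hv (i0 : Int)
  have hm : 0 < (pvVP skipL).length := by omega
  have hlen : (altValid skipL).length = (pvVP skipL).length := by
    rw [pv_valid_eq, List.length_map]
  have htlt : (r + (index.toNat - 1)) % (pvVP skipL).length < (pvVP skipL).length :=
    Nat.mod_lt _ hm
  have hvalid_get : ∀ (t : Nat) (ht : t < (pvVP skipL).length),
      (altValid skipL).getD t 'a' = pvAlpha.getD ((pvVP skipL)[t]) 'a' := by
    intro t ht
    rw [List.getD_eq_getElem _ 'a' (by omega), List.getElem_of_eq (pv_valid_eq skipL) (by omega),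
      List.getElem_map]
  -- A's side: the walk lands on the ((r + K - 1) mod m)-th valid position
  have hA : PySem.Int.mod ((pvNxt skipL)^[index.toNat] (i0 : Int)) 26
      = (((pvVP skipL)[(r + (index.toNat - 1)) % (pvVP skipL).length]'htlt : Nat) : Int) := by
    rw [PySem.Int.mod_eq_emod_of_pos (by norm_num), pv_iter_emod,
      Int.emod_eq_of_lt (by positivity) (by exact_mod_cast hi)]
    conv_lhs => rw [show index.toNat = (index.toNat - 1) + 1 from by omega]
    rw [Function.iterate_succ_apply, ← hrEq, pv_iterate skipL (index.toNat - 1) r hr]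
  rw [hA, PySem.List.pyGetD_natCast]
  -- B's side
  unfold pvBVal
  have hc2arg : PySem.Int.mod ((i0 : Int) + (pvDst skipL (i0 : Int) : Int)) 26
      = (((pvVP skipL)[r] : Nat) : Int) := by
    rw [PySem.Int.mod_eq_emod_of_pos (by norm_num), hrEq]; rfl
  rw [hc2arg, Int.toNat_natCast]
  have hc2 : pvAlpha.getD ((pvVP skipL)[r]) 'a' = (altValid skipL)[r]'(by omega) := by
    rw [List.getElem_of_eq (pv_valid_eq skipL) (by omega), List.getElem_map]
  rw [hc2]
  have hrank : (altRank skipL).getD ((altValid skipL)[r]'(by omega)) 0 = (r : Int) :=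
    PySem.Dict.getD_of_get?_eq_some _ _ (pv_rank_get? skipL r (by omega))
  rw [hrank]
  have hidx : (r : Int) + index - 1 = ((r + (index.toNat - 1) : Nat) : Int) := by
    push_cast; omega
  rw [hidx, hlen, PySem.Int.mod_natCast, Int.toNat_natCast]
  rw [hvalid_get _ htlt]

-- ===== VERDICT (by name: the statement is the Claim_ definition above) =====
theorem pv_hv_of_witness (skipL : List Char) (c : Char) (hcmem : c ∈ pvAlpha)
    (hcnot : c ∉ skipL) : pvHv skipL := by
  obtain ⟨k, hklt, hkval⟩ := List.mem_iff_getElem.1 hcmem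
  have hk26 : k < 26 := by rw [pvAlpha_length] at hklt; exact hklt
  refine ⟨k, hk26, ?_⟩
  rw [pvQ_lt26 skipL k hk26, List.getD_eq_getElem _ 'a' hklt, hkval]
  cases h : PySem.Chars.isIn [c] skipL with
  | false => rfl
  | true => exact absurd ((pv_isIn_singleton c skipL).1 h) hcnot

theorem pv_word_pos (w : Char) (k : Nat)
    (hk : PySem.List.index? pvAlpha w = some k) :
    k < 26 ∧ pvAlpha[k]'(by
      rcases PySem.List.getElem_of_index?_eq_some hk with ⟨h, _, _⟩; exact h) = w := by
  rcases PySem.List.getElem_of_index?_eq_some hk with ⟨h, hval, -⟩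
  exact ⟨by rw [pvAlpha_length] at h; exact h, hval⟩

theorem solution_spec : Claim_equal_solution := by
  intro s skip index hdom hpre
  have hchars : ∀ c ∈ s.toList, c ∈ pvAlpha := by
    intro c hc
    simpa using List.all_eq_true.1 hpre.1 c hc
  have hrest : 0 < index → s.toList = [] ∨ ∃ c ∈ pvAlpha, c ∉ skip.toList := by
    intro h
    rcases hpre.2 h with h1 | h2
    · exact Or.inl h1
    · obtain ⟨c, hcmem, hc⟩ := List.any_eq_true.1 h2
      exact Or.inr ⟨c, hcmem, by simpa using hc⟩
  show solution s skip index = solution_alt s skip index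
  unfold solution solution_alt
  rw [PySem.List.foldl_append_singleton_eq_map (solutionChar skip.toList index) s.toList []]
  simp only [List.nil_append]
  by_cases hle : index ≤ 0
  · rw [if_pos hle]
    have hall : ∀ w ∈ s.toList, solutionChar skip.toList index w = w := by
      intro w hw
      obtain ⟨k, hk⟩ := Option.isSome_iff_exists.1 ((PySem.List.index?_isSome_iff _ _).2 (hchars w hw))
      obtain ⟨hk26, hkval⟩ := pv_word_pos w k hk
      unfold solutionChar
      rw [hk]
      simp only [Option.getD_some]
      rw [pv_loop_exit _ _ _ _ _ (by omega)]
      rw [PySem.Int.mod_eq_emod_of_pos (by norm_num),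
        Int.emod_eq_of_lt (by positivity) (by exact_mod_cast hk26), PySem.List.pyGetD_natCast]
      rw [List.getD_eq_getElem _ 'a' (by rw [pvAlpha_length]; exact hk26)]
      exact hkval
    rw [List.map_congr_left hall, List.map_id', String.ofList_toList]
  · rw [if_neg hle]
    have hpos : 1 ≤ index := by omega
    rcases hrest (by omega) with hnil | ⟨c, hcmem, hcnot⟩
    · rw [hnil]; rfl
    · have hv : pvHv skip.toList := pv_hv_of_witness skip.toList c hcmem hcnot
      have hall : ∀ w ∈ s.toList, solutionChar skip.toList index w
          = (altShifted skip.toList index).getD w w := by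
        intro w hw
        obtain ⟨k, hk⟩ := Option.isSome_iff_exists.1 ((PySem.List.index?_isSome_iff _ _).2 (hchars w hw))
        obtain ⟨hk26, hkval⟩ := pv_word_pos w k hk
        unfold solutionChar
        rw [hk]
        simp only [Option.getD_some]
        rw [pv_loop_iter skip.toList index hv index.toNat (26 * (index.toNat + 1)) 0 (k : Int)
          (by omega) (by omega)]
        rw [pv_char_eq skip.toList index hv hpos k hk26]
        have hget := pv_shifted_get? skip.toList index hv k (by rw [pvAlpha_length]; exact hk26)
        rw [hkval] at hget
        exact (PySem.Dict.getD_of_get?_eq_some _ _ hget).symm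
      rw [List.map_congr_left hall]
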